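-- pv_equiv track=rewrite | github.com/bimalkant-lauhny/Distributed-Downloader-and-Merger | calculation.py | getDownloadSizesList
-- ===== SOURCE A (Python) =====
-- def getDownloadSizesList(filesize, parts):
--     # no of bytes per thread
--     size_per_thread = filesize//parts
--     # stores size to be downloaded by each thread
--     sizes_list = [size_per_thread] * parts
--     # remaining size not assigned to any thread
--     rem = filesize % parts
--     # loop to equally assign sizes to download, to each thread
--     index = 0
--     while rem != 0:
--         sizes_list[index] += 1
--         rem -= 1
--         index += 1
--
--     return sizes_list
-- ===== SOURCE B (Python) =====
-- def getDownloadSizesList(filesize, parts):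
--     # Greedy peel-off: repeatedly hand the first thread the ceiling of the
--     # remaining size over the remaining threads, then recurse on the rest.
--     sizes_list = []
--     rest = filesize
--     p = parts
--     while p > 0:
--         head = (rest + p - 1) // p  # ceil(rest / p): largest fair share
--         sizes_list.append(head)
--         rest -= head
--         p -= 1
--     return sizes_list
-- ===== Notes on version B (the rewrite author's own statement) =====
-- stated objective: alternative
-- what changed: Replaces A's fill-then-patch (precompute filesize//parts and filesize%parts, build a uniform list, then a while-loop incrementing the first rem slots) with a greedy peel-off pass that never computes the remainder: each step appends ceil(rest/p) of the shrinking remaining size over the shrinking remaining thread count.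
import Mathlib
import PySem

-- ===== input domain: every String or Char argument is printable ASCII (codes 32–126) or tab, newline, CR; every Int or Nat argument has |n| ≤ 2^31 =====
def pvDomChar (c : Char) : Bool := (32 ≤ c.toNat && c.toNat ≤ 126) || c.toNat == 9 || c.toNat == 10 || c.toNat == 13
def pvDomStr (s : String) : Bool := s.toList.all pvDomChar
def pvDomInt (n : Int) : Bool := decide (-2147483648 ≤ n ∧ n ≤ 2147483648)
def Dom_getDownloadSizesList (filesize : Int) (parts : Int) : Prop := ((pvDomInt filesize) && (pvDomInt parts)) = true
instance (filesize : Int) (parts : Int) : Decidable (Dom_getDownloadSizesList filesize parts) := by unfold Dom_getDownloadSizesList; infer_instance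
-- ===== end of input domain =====

-- B replaces A's fill-then-patch (uniform list, then increment the first rem slots) with a greedy
-- peel-off pass appending ceil(rest/p) of the shrinking remaining size. Objective: alternative.
-- Return-value equivalence (A mutates only its own local list).

-- ===== PORT A =====
-- the 'while rem != 0' loop of A; the '0 < rem' test is a totality guard only: inside Pre_ the loop
-- is only ever entered with rem > 0, and where Python would raise (rem < 0 on the empty list) Pre_ excludes the input
def pvLoopA (sizes : List Int) (rem : Int) (index : Int) : List Int :=
  if h : 0 < rem then
    pvLoopA (PySem.List.pySetD sizes index (PySem.List.pyGetD sizes index 0 + 1)) (rem - 1) (index + 1)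
  else sizes
termination_by rem.toNat
decreasing_by omega

def getDownloadSizesList (filesize : Int) (parts : Int) : List Int :=
  let size_per_thread := PySem.Int.floordiv filesize parts
  let sizes_list := List.replicate parts.toNat size_per_thread
  let rem := PySem.Int.mod filesize parts
  pvLoopA sizes_list rem 0

-- ===== PORT B =====
-- the 'while p > 0' loop of B: append ceil(rest/p) = (rest + p - 1) // p, shrink rest and p
def pvLoopB (sizes : List Int) (rest : Int) (p : Int) : List Int :=
  if h : 0 < p then
    pvLoopB (sizes ++ [PySem.Int.floordiv (rest + p - 1) p])
            (rest - PySem.Int.floordiv (rest + p - 1) p) (p - 1)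
  else sizes
termination_by p.toNat
decreasing_by omega

def getDownloadSizesList_alt (filesize : Int) (parts : Int) : List Int :=
  pvLoopB [] filesize parts

-- ===== PRECONDITION & SPEC =====
-- Pre_ excludes exactly the inputs where A raises: parts = 0 (ZeroDivisionError) and
-- parts < 0 with a nonzero remainder (A's while-loop indexes into the empty list: IndexError).
def Pre_getDownloadSizesList (filesize : Int) (parts : Int) : Prop :=
  parts ≠ 0 ∧ (0 < parts ∨ PySem.Int.mod filesize parts = 0)
instance (filesize : Int) (parts : Int) : Decidable (Pre_getDownloadSizesList filesize parts) := by unfold Pre_getDownloadSizesList; infer_instance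
def pvWitness_getDownloadSizesList : Int × Int := (10, 3)

def Spec_getDownloadSizesList (filesize : Int) (parts : Int) (out : List Int) : Prop := out = getDownloadSizesList_alt filesize parts
instance (filesize : Int) (parts : Int) (out : List Int) : Decidable (Spec_getDownloadSizesList filesize parts out) := by unfold Spec_getDownloadSizesList; infer_instance

-- ===== CLAIM (what is proved, stated in full; the proofs are below) =====
def Claim_equal_getDownloadSizesList : Prop := ∀ (filesize : Int) (parts : Int), Dom_getDownloadSizesList filesize parts → Pre_getDownloadSizesList filesize parts → Spec_getDownloadSizesList filesize parts (getDownloadSizesList filesize parts)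

-- ===== LEMMAS AND PROOFS =====

-- the common target: element i is filesize//parts, plus 1 for the first filesize%parts indices
def pvTarget (f p : Int) : List Int :=
  (PySem.List.pyRange 0 p 1).map (fun i => PySem.Int.floordiv f p + (if i < PySem.Int.mod f p then 1 else 0))

theorem pv_fdiv_mod_unique (f p q r : Int) (hp : 0 < p) (hf : f = p * q + r)
    (h0 : 0 ≤ r) (h1 : r < p) :
    PySem.Int.floordiv f p = q ∧ PySem.Int.mod f p = r := by
  have hq : PySem.Int.floordiv f p = q := by
    rw [PySem.Int.floordiv_eq_iff_of_pos hp]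
    constructor <;> nlinarith
  refine ⟨hq, ?_⟩
  have h := PySem.Int.floordiv_mul_add_mod f p
  rw [hq] at h
  nlinarith

-- peeling one head off the target list
theorem pvTarget_cons (f p : Int) (hp : 0 < p) :
    pvTarget f p
      = PySem.Int.floordiv (f + p - 1) p
        :: pvTarget (f - PySem.Int.floordiv (f + p - 1) p) (p - 1) := by
  set q := PySem.Int.floordiv f p with hq
  set r := PySem.Int.mod f p with hr
  have hfr : q * p + r = f := PySem.Int.floordiv_mul_add_mod f p
  have hr0 : 0 ≤ r := PySem.Int.mod_nonneg f hp
  have hr1 : r < p := PySem.Int.mod_lt f hp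
  have hhead : PySem.Int.floordiv (f + p - 1) p = q + (if 0 < r then 1 else 0) := by
    by_cases h : 0 < r
    · rw [if_pos h]
      exact (pv_fdiv_mod_unique (f + p - 1) p (q + 1) (r - 1) hp (by nlinarith) (by omega) (by omega)).1
    · rw [if_neg h, add_zero]
      exact (pv_fdiv_mod_unique (f + p - 1) p q (p - 1) hp (by nlinarith) (by omega) (by omega)).1
  rw [hhead]
  by_cases hp1 : p = 1
  · subst hp1
    have hr0' : r = 0 := by omega
    unfold pvTarget
    rw [PySem.List.pyRange_one_cons (by norm_num), PySem.List.pyRange_one_eq_nil (by norm_num),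
        PySem.List.pyRange_one_eq_nil (by norm_num)]
    simp [hr0']
    omega
  · have hp2 : 2 ≤ p := by omega
    -- tail divmod: (f - head) over (p - 1) has quotient q and remainder max(r-1,0)
    have htail : PySem.Int.floordiv (f - (q + (if 0 < r then 1 else 0))) (p - 1) = q
        ∧ PySem.Int.mod (f - (q + (if 0 < r then 1 else 0))) (p - 1)
            = (if 0 < r then r - 1 else 0) := by
      by_cases h : 0 < r
      · simp only [if_pos h]
        exact pv_fdiv_mod_unique (f - (q + 1)) (p - 1) q (r - 1) (by omega) (by nlinarith) (by omega) (by omega)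
      · simp only [if_neg h]
        exact pv_fdiv_mod_unique (f - (q + 0)) (p - 1) q 0 (by omega) (by nlinarith) (by omega) (by omega)
    unfold pvTarget
    rw [← hq, ← hr, htail.1, htail.2]
    rw [PySem.List.pyRange_one_cons (by omega)]
    simp only [List.map_cons, List.cons.injEq]
    constructor
    · by_cases h : 0 < r <;> simp
    · -- both tails have the pyRange shape; compare elementwise
      apply List.ext_getElem
      · simp only [List.length_map, PySem.List.length_pyRange_one]
        omega
      · intro k hk1 hk2
        simp only [List.getElem_map, PySem.List.getElem_pyRange_one]
        by_cases h : 0 < r <;> simp only [h, if_true, if_false] <;>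
          congr 1 <;> by_cases hkr : ((k : Int) < r - 1) <;> by_cases hkr2 : (1 + (k:Int) < r) <;>
          simp [hkr, hkr2] <;> omega

theorem pvLoopB_eq (n : Nat) : ∀ (acc : List Int) (f p : Int), p.toNat = n →
    pvLoopB acc f p = acc ++ pvTarget f p := by
  induction n with
  | zero =>
    intro acc f p hn
    have hp : ¬ 0 < p := by omega
    rw [pvLoopB.eq_def]
    simp only [dif_neg hp]
    unfold pvTarget
    rw [PySem.List.pyRange_one_eq_nil (by omega)]
    simp
  | succ n ih =>
    intro acc f p hn
    have hp : 0 < p := by omega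
    rw [pvLoopB.eq_def]
    simp only [dif_pos hp]
    rw [ih _ _ (p - 1) (by omega), pvTarget_cons f p hp, List.append_assoc]
    rfl

theorem pvLoopA_length (sizes : List Int) (rem index : Int) :
    (pvLoopA sizes rem index).length = sizes.length := by
  fun_induction pvLoopA sizes rem index with
  | case1 s r i h ih => rw [ih, PySem.List.length_pySetD]
  | case2 s r i h => rfl

theorem pvLoopA_getD (n : Nat) : ∀ (sizes : List Int) (rem idx : Int) (j : Nat),
    rem.toNat = n → 0 ≤ idx → 0 ≤ rem → idx + rem ≤ sizes.length → j < sizes.length →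
    (pvLoopA sizes rem idx).getD j 0
      = sizes.getD j 0 + (if idx ≤ (j : Int) ∧ (j : Int) < idx + rem then 1 else 0) := by
  induction n with
  | zero =>
    intro s rem idx j hn hidx hrem hb hj
    have h0 : rem = 0 := by omega
    subst h0
    rw [pvLoopA.eq_def]
    simp only [dif_neg (by omega : ¬ (0:Int) < 0)]
    have : ¬ (idx ≤ (j : Int) ∧ (j : Int) < idx + 0) := by omega
    rw [if_neg this]; ring
  | succ n ih =>
    intro s rem idx j hn hidx hrem hb hj
    have hr : 0 < rem := by omega
    have hidxlt : idx < s.length := by omega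
    rw [pvLoopA.eq_def]
    simp only [dif_pos hr]
    have hset : PySem.List.pySetD s idx (PySem.List.pyGetD s idx 0 + 1)
        = s.set idx.toNat (PySem.List.pyGetD s idx 0 + 1) :=
      PySem.List.pySetD_of_nonneg s _ hidx
    rw [hset]
    rw [ih (s.set idx.toNat (PySem.List.pyGetD s idx 0 + 1)) (rem - 1) (idx + 1) j
      (by omega) (by omega) (by omega) (by simp; omega) (by simpa using hj)]
    have hget : PySem.List.pyGetD s idx 0 = s.getD idx.toNat 0 := by
      rw [PySem.List.pyGetD_eq_getElem s 0 hidx hidxlt, List.getD_eq_getElem s 0 (by omega)]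
    have hsetget : (s.set idx.toNat (PySem.List.pyGetD s idx 0 + 1)).getD j 0
        = if idx.toNat = j then PySem.List.pyGetD s idx 0 + 1 else s.getD j 0 := by
      simp only [List.getD, List.getElem?_set]
      split_ifs with h1 h2
      all_goals first | rfl | omega
    rw [hsetget]
    by_cases hje : idx.toNat = j
    · rw [if_pos hje, hget, hje]
      have h1 : ¬ (idx + 1 ≤ (j : Int) ∧ (j : Int) < idx + 1 + (rem - 1)) := by omega
      have h2 : idx ≤ (j : Int) ∧ (j : Int) < idx + rem := by omega
      rw [if_neg h1, if_pos h2]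
      ring
    · rw [if_neg hje]
      have : (idx + 1 ≤ (j : Int) ∧ (j : Int) < idx + 1 + (rem - 1))
           ↔ (idx ≤ (j : Int) ∧ (j : Int) < idx + rem) := by omega
      rw [if_congr this rfl rfl]

-- A equals the common target on Pre_
theorem pvA_eq_target (f p : Int) (hp0 : p ≠ 0)
    (hpos : 0 < p ∨ PySem.Int.mod f p = 0) :
    getDownloadSizesList f p = pvTarget f p := by
  unfold getDownloadSizesList pvTarget
  rcases lt_or_gt_of_ne hp0 with hneg | hpos'
  · have hrem : PySem.Int.mod f p = 0 := by
      rcases hpos with h | h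
      · omega
      · exact h
    have ht : p.toNat = 0 := by omega
    rw [hrem, ht, PySem.List.pyRange_one_eq_nil (by omega)]
    rw [pvLoopA.eq_def]
    simp
  · have hremlb : 0 ≤ PySem.Int.mod f p := PySem.Int.mod_nonneg _ hpos'
    have hremub : PySem.Int.mod f p < p := PySem.Int.mod_lt _ hpos'
    set base := PySem.Int.floordiv f p with hbase
    set rem := PySem.Int.mod f p with hrem
    have hlenA : (pvLoopA (List.replicate p.toNat base) rem 0).length = p.toNat := by
      rw [pvLoopA_length, List.length_replicate]
    have hlenB : ((PySem.List.pyRange 0 p 1).map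
        (fun i => base + (if i < rem then 1 else 0))).length = p.toNat := by
      rw [List.length_map, PySem.List.length_pyRange_one]; simp
    apply List.ext_getElem (by rw [hlenA, hlenB])
    intro j hjA hjB
    have hj : j < p.toNat := by omega
    rw [← List.getD_eq_getElem _ 0 hjA]
    rw [pvLoopA_getD rem.toNat (List.replicate p.toNat base) rem 0 j rfl le_rfl hremlb
      (by rw [List.length_replicate]; omega) (by rw [List.length_replicate]; exact hj)]
    have hBj : ((PySem.List.pyRange 0 p 1).map
        (fun i => base + (if i < rem then 1 else 0)))[j]'hjB
        = base + (if (j : Int) < rem then 1 else 0) := by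
      rw [List.getElem_map, PySem.List.getElem_pyRange_one]
      simp
    rw [hBj, List.getD_replicate]
    have : (0 ≤ (j : Int) ∧ (j : Int) < 0 + rem) ↔ ((j : Int) < rem) := by omega
    rw [if_congr this rfl rfl]
    · omega

-- ===== VERDICT (by name: the statement is the Claim_ definition above) =====
theorem getDownloadSizesList_spec : Claim_equal_getDownloadSizesList := by
  intro f p _ hpre
  obtain ⟨hp0, hpos⟩ := hpre
  unfold Spec_getDownloadSizesList getDownloadSizesList_alt
  rw [pvLoopB_eq p.toNat [] f p rfl, pvA_eq_target f p hp0 hpos]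
  simp
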